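-- pv_equiv track=rewrite | github.com/MALeyman/projects | ML/NLP/imdb/dataset/utils.py | inv1
-- ===== SOURCE A (Python) =====
-- def inv1(str1):
--     '''
--     функция получения рейтинга отзыва и номера отзыва по имени файла
--     '''
--     l = len(str1)
--     ss = '444'
--     kk = ''
--     for i in range(l):
--         s = str1[i]
--         ss = ss + s
--         if s !='_':
--             continue
--         if s =='_':
--             i = i+1
--             while i < l:
--                 ss = ss + str1[i]
--                 kk = str1[i]
--                 i = i+1
--             break
--     return ss, kk
-- ===== SOURCE B (Python) =====
-- def inv1(str1):
--     '''
--     функция получения рейтинга отзыва и номера отзыва по имени файла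
--     '''
--     ss = '444' + str1
--     p = str1.find('_')
--     kk = str1[-1] if 0 <= p < len(str1) - 1 else ''
--     return ss, kk
-- ===== Notes on version B (the rewrite author's own statement) =====
-- stated objective: simpler
-- what changed: Replaces the character-by-character append loop with a single prefix concatenation and the nested underscore scan (outer state-machine loop plus inner while) with str.find plus one last-character index under the condition 0 <= p < len(str1)-1.
import Mathlib
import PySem

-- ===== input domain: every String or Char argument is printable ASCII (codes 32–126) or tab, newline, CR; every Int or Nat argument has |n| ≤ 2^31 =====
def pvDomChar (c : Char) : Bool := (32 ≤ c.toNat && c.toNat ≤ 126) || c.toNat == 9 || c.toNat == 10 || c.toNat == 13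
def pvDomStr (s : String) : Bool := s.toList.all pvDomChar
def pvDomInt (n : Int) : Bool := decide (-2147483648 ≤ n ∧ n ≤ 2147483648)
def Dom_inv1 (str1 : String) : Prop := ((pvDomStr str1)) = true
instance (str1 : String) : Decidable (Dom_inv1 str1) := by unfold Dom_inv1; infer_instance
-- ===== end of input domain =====

-- B replaces A's character-append loop and nested underscore scan by one concatenation plus find()+last-index (objective: simpler).

-- ===== PORT A =====
-- inner 'while i < l' loop: keeps appending and overwriting kk with the 1-char string str1[i]
def inv1Inner : List Char → List Char → List Char → List Char × List Char
  | [], ss, kk => (ss, kk)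
  | c :: rest, ss, _kk => inv1Inner rest (ss ++ [c]) [c]

-- outer 'for i in range(l)' loop with the break after the inner loop
def inv1Outer : List Char → List Char → List Char → List Char × List Char
  | [], ss, kk => (ss, kk)
  | c :: rest, ss, kk =>
    if c ≠ '_' then inv1Outer rest (ss ++ [c]) kk
    else inv1Inner rest (ss ++ [c]) kk

def inv1 (str1 : String) : String × String :=
  let r := inv1Outer str1.toList ("444".toList) []
  (String.ofList r.1, String.ofList r.2)

-- ===== PORT B =====
def inv1_alt (str1 : String) : String × String :=
  let ss := String.ofList ("444".toList ++ str1.toList)   -- '444' + str1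
  let p := PySem.Str.find str1 "_"
  let kk := if 0 ≤ p ∧ p < PySem.Str.len str1 - 1 then
      (match PySem.Str.pyGet? str1 (-1) with   -- str1[-1]; the guard guarantees it exists
        | some c => String.ofList [c]
        | none => "")
    else ""
  (ss, kk)

-- ===== PRECONDITION & SPEC =====
def Spec_inv1 (str1 : String) (out : String × String) : Prop := out = inv1_alt str1
instance (str1 : String) (out : String × String) : Decidable (Spec_inv1 str1 out) := by unfold Spec_inv1; infer_instance

-- ===== CLAIM (what is proved, stated in full; the proofs are below) =====
def Claim_equal_inv1 : Prop := ∀ (str1 : String), Dom_inv1 str1 → Spec_inv1 str1 (inv1 str1)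

-- ===== LEMMAS AND PROOFS =====

theorem inv1Inner_eq (suf : List Char) : ∀ (ss kk : List Char),
    inv1Inner suf ss kk = (ss ++ suf, match suf.getLast? with | none => kk | some c => [c]) := by
  induction suf with
  | nil => intro ss kk; simp [inv1Inner]
  | cons c rest ih =>
    intro ss kk
    simp only [inv1Inner, ih]
    cases h : rest.getLast? with
    | none => simp_all [List.getLast?_eq_none_iff, List.getLast?_cons]
    | some d => simp_all [List.getLast?_cons]

theorem find_go_succ (sub : List Char) (hsub : sub ≠ []) (cs : List Char) : ∀ (k : Nat),
    PySem.Chars.find.go sub cs (k + 1) =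
      (if PySem.Chars.find.go sub cs k = -1 then -1 else PySem.Chars.find.go sub cs k + 1) := by
  induction cs with
  | nil => intro k; simp [PySem.Chars.find.go, List.isEmpty_iff, hsub]
  | cons c rest ih =>
    intro k
    simp only [PySem.Chars.find.go]
    split
    · have : ((k : Int)) ≠ -1 := by omega
      simp [this]
    · exact ih (k + 1)

theorem find_cons_ne (c : Char) (cs : List Char) (h : c ≠ '_') :
    PySem.Chars.find (c :: cs) ['_'] =
      (if PySem.Chars.find cs ['_'] = -1 then -1 else PySem.Chars.find cs ['_'] + 1) := by
  have hpre : ¬ (List.isPrefixOf ['_'] (c :: cs) = true) := by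
    simp [List.isPrefixOf_cons₂]; intro hc; exact absurd hc.symm h
  simp only [PySem.Chars.find, PySem.Chars.find.go, hpre]
  exact find_go_succ ['_'] (by simp) cs 0

-- B's kk value on the list side
def bkk (cs : List Char) : List Char :=
  if 0 ≤ PySem.Chars.find cs ['_'] ∧ PySem.Chars.find cs ['_'] < (cs.length : Int) - 1 then
    (match cs.getLast? with | none => [] | some c => [c])
  else []

theorem inv1Outer_eq (cs : List Char) : ∀ (acc : List Char),
    inv1Outer cs acc [] = (acc ++ cs, bkk cs) := by
  induction cs with
  | nil => intro acc; simp [inv1Outer, bkk, PySem.Chars.find, PySem.Chars.find.go]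
  | cons c rest ih =>
    intro acc
    by_cases h : c = '_'
    · subst h
      simp only [inv1Outer, ite_not, inv1Inner_eq]
      have hfind : PySem.Chars.find ('_' :: rest) ['_'] = 0 := by
        simp [PySem.Chars.find, PySem.Chars.find.go]
      unfold bkk
      rw [hfind]
      cases hr : rest.getLast? with
      | none =>
        have : rest = [] := List.getLast?_eq_none_iff.mp hr
        subst this
        simp
      | some d =>
        have hne : rest ≠ [] := by
          intro he; subst he; simp at hr
        have hlen : 0 < rest.length := List.length_pos_iff.mpr hne
        have hcond : (0 : Int) ≤ 0 ∧ (0 : Int) < (('_' :: rest).length : Int) - 1 := by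
          constructor
          · omega
          · simp only [List.length_cons]; push_cast; omega
        rw [if_pos hcond]
        simp [List.getLast?_cons, hr]
    · simp only [inv1Outer, if_pos h, ih, List.append_assoc, List.cons_append, List.nil_append]
      suffices hsf : bkk (c :: rest) = bkk rest by rw [hsf]
      unfold bkk
      rw [find_cons_ne c rest h]
      by_cases hf : PySem.Chars.find rest ['_'] = -1
      · rw [if_pos hf]
        have hneg : ¬ ((0:Int) ≤ -1 ∧ (-1:Int) < ((c :: rest).length : Int) - 1) := by omega
        have hneg2 : ¬ ((0:Int) ≤ -1 ∧ (-1:Int) < ((rest).length : Int) - 1) := by omega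
        rw [hf, if_neg hneg, if_neg hneg2]
      · rw [if_neg hf]
        have hge : 0 ≤ PySem.Chars.find rest ['_'] := by
          have := PySem.Chars.neg_one_le_find rest ['_']
          omega
        have hle : PySem.Chars.find rest ['_'] ≤ (rest.length : Int) :=
          PySem.Chars.find_le_length rest ['_']
        have hne : rest ≠ [] := by
          intro he; subst he
          simp [PySem.Chars.find, PySem.Chars.find.go] at hf
        have hgl : (c :: rest).getLast? = rest.getLast? := by
          cases rest with
          | nil => exact absurd rfl hne
          | cons d t => simp [List.getLast?_cons]
        rw [hgl]
        have hiff : ((0:Int) ≤ PySem.Chars.find rest ['_'] + 1 ∧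
            PySem.Chars.find rest ['_'] + 1 < ((c :: rest).length : Int) - 1) ↔
            ((0:Int) ≤ PySem.Chars.find rest ['_'] ∧
            PySem.Chars.find rest ['_'] < ((rest).length : Int) - 1) := by
          simp only [List.length_cons]; push_cast; omega
        by_cases hc : (0:Int) ≤ PySem.Chars.find rest ['_'] ∧
            PySem.Chars.find rest ['_'] < ((rest).length : Int) - 1
        · rw [if_pos (hiff.mpr hc), if_pos hc]
        · rw [if_neg (fun hx => hc (hiff.mp hx)), if_neg hc]

-- ===== VERDICT (by name: the statement is the Claim_ definition above) =====
theorem inv1_spec : Claim_equal_inv1 := by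
  intro str1 _
  unfold Spec_inv1 inv1 inv1_alt
  rw [inv1Outer_eq]
  have hsub : ("_" : String).toList = ['_'] := rfl
  simp only [PySem.Str.find, hsub, PySem.Str.len_eq, PySem.Str.pyGet?]
  refine Prod.ext rfl ?_
  simp only [bkk]
  by_cases hc : 0 ≤ PySem.Chars.find str1.toList ['_'] ∧
      PySem.Chars.find str1.toList ['_'] < (str1.toList.length : Int) - 1
  · rw [if_pos hc, if_pos hc]
    have hne : str1.toList ≠ [] := by
      intro he
      rw [he] at hc
      simp [PySem.Chars.find, PySem.Chars.find.go] at hc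
    rw [show PySem.Chars.pyGet? str1.toList (-1) = str1.toList.getLast? from
      PySem.List.pyGet?_neg_one str1.toList]
    cases hg : str1.toList.getLast? with
    | none => exact absurd (List.getLast?_eq_none_iff.mp hg) hne
    | some d => rfl
  · rw [if_neg hc, if_neg hc]
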